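-- pv_equiv track=rewrite | github.com/YangLab-SDU/PathDiffusion | src/models/guidance/score_network.py | _find_continuous_segments
-- ===== SOURCE A (Python) =====
-- def _find_continuous_segments(mask, seq_len, min_length=3):
--     segments = []
--     start_idx = None
--     for i in range(seq_len):
--         if mask[i] and start_idx is None:
--             start_idx = i
--         elif not mask[i] and start_idx is not None:
--             if (i - 1) - start_idx + 1 >= min_length:
--                 segments.append((start_idx, i - 1))
--             start_idx = None
--     if start_idx is not None and (seq_len - 1) - start_idx + 1 >= min_length:
--         segments.append((start_idx, seq_len - 1))
--     return segments
-- ===== SOURCE B (Python) =====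
-- def _find_continuous_segments(mask, seq_len, min_length=3):
--     # Boundary detection: a segment starts where mask turns on and ends where
--     # it turns off; collect all start indices and all end indices separately,
--     # pair them up positionally, then filter by length.
--     starts = [i for i in range(seq_len)
--               if mask[i] and (i == 0 or not mask[i - 1])]
--     ends = [i for i in range(seq_len)
--             if mask[i] and (i == seq_len - 1 or not mask[i + 1])]
--     return [(s, e) for s, e in zip(starts, ends) if e - s + 1 >= min_length]
-- ===== Notes on version B (the rewrite author's own statement) =====
-- stated objective: alternative
-- what changed: Replaces A's sequential state machine (optional start_idx opened/closed while scanning) by boundary detection: run starts (on-transitions) and run ends (off-transitions) are computed as two independent index lists by neighbour comparison, then zipped positionally and filtered by length.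
import Mathlib
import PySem

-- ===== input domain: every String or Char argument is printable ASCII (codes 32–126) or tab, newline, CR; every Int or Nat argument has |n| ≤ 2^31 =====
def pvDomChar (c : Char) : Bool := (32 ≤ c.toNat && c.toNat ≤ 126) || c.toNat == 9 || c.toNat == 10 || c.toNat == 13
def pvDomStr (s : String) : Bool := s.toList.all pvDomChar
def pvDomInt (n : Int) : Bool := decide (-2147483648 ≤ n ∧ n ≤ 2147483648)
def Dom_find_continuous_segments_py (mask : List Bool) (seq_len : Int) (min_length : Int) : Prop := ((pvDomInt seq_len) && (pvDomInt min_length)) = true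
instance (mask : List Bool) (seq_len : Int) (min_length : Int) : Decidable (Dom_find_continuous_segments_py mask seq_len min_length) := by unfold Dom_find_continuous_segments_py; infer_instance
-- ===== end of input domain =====

-- B replaces A's sequential state machine by boundary detection: run starts and run
-- ends found independently by neighbour comparison, zipped, then filtered by length.

-- ===== PORT A =====
-- one iteration of A's for-loop: state = (segments, start_idx)
def fcsStepA (mask : List Bool) (min_length : Int)
    (st : List (Int × Int) × Option Int) (i : Int) : List (Int × Int) × Option Int :=
  let m := (PySem.List.pyGet? mask i).getD false   -- in-range under Pre_ (Python raises otherwise)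
  match st.2 with
  | none => if m then (st.1, some i) else st
  | some s =>
      if m then st
      else (if min_length ≤ (i - 1) - s + 1 then st.1 ++ [(s, i - 1)] else st.1, none)

def find_continuous_segments_py (mask : List Bool) (seq_len : Int) (min_length : Int) : List (Int × Int) :=
  let st := (PySem.List.pyRange 0 seq_len 1).foldl (fcsStepA mask min_length) ([], none)
  match st.2 with
  | some s => if min_length ≤ (seq_len - 1) - s + 1 then st.1 ++ [(s, seq_len - 1)] else st.1
  | none => st.1

-- ===== PORT B =====
-- mask[i] as a total Bool (indices used are in range under Pre_, or short-circuited)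
def fcsGet (mask : List Bool) (i : Int) : Bool := (PySem.List.pyGet? mask i).getD false

-- a run starts at i: mask[i] on, left neighbour off (or i is the first index)
def fcsStartP (mask : List Bool) (i : Int) : Bool :=
  fcsGet mask i && (i == 0 || !fcsGet mask (i - 1))

-- a run ends at i: mask[i] on, right neighbour off (or i is the last index)
def fcsEndP (mask : List Bool) (seq_len : Int) (i : Int) : Bool :=
  fcsGet mask i && (i == seq_len - 1 || !fcsGet mask (i + 1))

def find_continuous_segments_py_alt (mask : List Bool) (seq_len : Int) (min_length : Int) : List (Int × Int) :=
  let starts := (PySem.List.pyRange 0 seq_len 1).filter (fcsStartP mask)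
  let ends := (PySem.List.pyRange 0 seq_len 1).filter (fcsEndP mask seq_len)
  (starts.zip ends).filter (fun p => decide (min_length ≤ p.2 - p.1 + 1))

-- ===== PRECONDITION & SPEC =====
-- Pre_ excludes exactly the inputs where Python's mask[i] raises IndexError: seq_len > len(mask).
def Pre_find_continuous_segments_py (mask : List Bool) (seq_len : Int) (min_length : Int) : Prop :=
  seq_len ≤ (mask.length : Int)
instance (mask : List Bool) (seq_len : Int) (min_length : Int) : Decidable (Pre_find_continuous_segments_py mask seq_len min_length) := by unfold Pre_find_continuous_segments_py; infer_instance

def pvWitness_find_continuous_segments_py : List Bool × Int × Int :=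
  ([true, true, true, false, true], 5, 3)

def Spec_find_continuous_segments_py (mask : List Bool) (seq_len : Int) (min_length : Int) (out : List (Int × Int)) : Prop := out = find_continuous_segments_py_alt mask seq_len min_length
instance (mask : List Bool) (seq_len : Int) (min_length : Int) (out : List (Int × Int)) : Decidable (Spec_find_continuous_segments_py mask seq_len min_length out) := by unfold Spec_find_continuous_segments_py; infer_instance

-- ===== CLAIM (what is proved, stated in full; the proofs are below) =====
def Claim_equal_find_continuous_segments_py : Prop := ∀ (mask : List Bool) (seq_len : Int) (min_length : Int), Dom_find_continuous_segments_py mask seq_len min_length → Pre_find_continuous_segments_py mask seq_len min_length → Spec_find_continuous_segments_py mask seq_len min_length (find_continuous_segments_py mask seq_len min_length)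

-- ===== LEMMAS AND PROOFS =====

-- proof-side reference: the list of maximal runs, built left to right
def fcsStepR (mask : List Bool) (runs : List (Int × Int)) (i : Int) : List (Int × Int) :=
  if fcsGet mask i then
    match runs.getLast? with
    | some (s, e) => if e = i - 1 then runs.dropLast ++ [(s, i)] else runs ++ [(i, i)]
    | none => runs ++ [(i, i)]
  else runs

def fcsPred (min_length : Int) (p : Int × Int) : Bool := decide (min_length ≤ p.2 - p.1 + 1)

-- endCore: an end strictly inside the scanned prefix (right neighbour off)
def fcsEndCore (mask : List Bool) (i : Int) : Bool := fcsGet mask i && !fcsGet mask (i + 1)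

-- A's loop vs the run list: invariant of the previous formulation
theorem fcs_inv (mask : List Bool) (min_length : Int) (n : Nat) :
    let stA := (PySem.List.pyRange 0 (n : Int) 1).foldl (fcsStepA mask min_length) ([], none)
    let R := (PySem.List.pyRange 0 (n : Int) 1).foldl (fcsStepR mask) []
    match stA.2 with
    | none => R.filter (fcsPred min_length) = stA.1 ∧ ∀ p ∈ R, p.2 + 1 < (n : Int)
    | some s => ∃ runs', R = runs' ++ [(s, (n : Int) - 1)] ∧
        runs'.filter (fcsPred min_length) = stA.1 ∧ ∀ p ∈ runs', p.2 + 1 < (n : Int) := by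
  induction n with
  | zero => simp [PySem.List.pyRange_one_eq_nil]
  | succ n ih =>
    intro stA R
    have hsplit : PySem.List.pyRange 0 ((n + 1 : Nat) : Int) 1
        = PySem.List.pyRange 0 (n : Int) 1 ++ [(n : Int)] := by
      push_cast
      exact PySem.List.pyRange_one_succ_right (by positivity)
    simp only [stA, R, hsplit, List.foldl_append, List.foldl_cons, List.foldl_nil]
    set stA0 := (PySem.List.pyRange 0 (n : Int) 1).foldl (fcsStepA mask min_length) ([], none) with hA0
    set R0 := (PySem.List.pyRange 0 (n : Int) 1).foldl (fcsStepR mask) [] with hR0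
    simp only at ih
    cases hm : fcsGet mask (n : Int) with
    | false =>
      cases hs : stA0.2 with
      | none =>
        rw [hs] at ih
        simp only [fcsStepA, fcsStepR, fcsGet] at hm ⊢
        simp only [hm, hs, Bool.false_eq_true, if_false]
        refine ⟨ih.1, fun p hp => ?_⟩
        have := ih.2 p hp; push_cast; omega
      | some s =>
        rw [hs] at ih
        obtain ⟨runs', hR, hfilt, hb⟩ := ih
        simp only [fcsStepA, fcsStepR, fcsGet] at hm ⊢
        simp only [hm, hs, Bool.false_eq_true, if_false, hR]
        constructor
        · rw [List.filter_append, hfilt, List.filter_singleton]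
          by_cases h : min_length ≤ ((n : Int) - 1) - s + 1
          · simp [h, fcsPred]
          · simp [h, fcsPred]
        · intro p hp
          rcases List.mem_append.mp hp with h | h
          · have := hb p h; push_cast; omega
          · simp at h
            have : p.2 = (n : Int) - 1 := by rw [h]
            push_cast; omega
    | true =>
      cases hs : stA0.2 with
      | none =>
        rw [hs] at ih
        obtain ⟨hfilt, hb⟩ := ih
        simp only [fcsStepA, fcsStepR, fcsGet] at hm ⊢
        simp only [hm, hs, if_true]
        have hlast : (match R0.getLast? with
            | some (s, e) => if e = (n : Int) - 1 then R0.dropLast ++ [(s, (n : Int))] else R0 ++ [((n : Int), (n : Int))]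
            | none => R0 ++ [((n : Int), (n : Int))]) = R0 ++ [((n : Int), (n : Int))] := by
          cases hl : R0.getLast? with
          | none => simp
          | some pe =>
            obtain ⟨s0, e0⟩ := pe
            have hmem : (s0, e0) ∈ R0 := List.mem_of_getLast? hl
            have he : e0 ≠ (n : Int) - 1 := by have := hb _ hmem; omega
            simp [he]
        rw [hlast]
        refine ⟨R0, by push_cast; ring_nf, hfilt, fun p hp => by have := hb p hp; push_cast; omega⟩
      | some s =>
        rw [hs] at ih
        obtain ⟨runs', hR, hfilt, hb⟩ := ih
        simp only [fcsStepA, fcsStepR, fcsGet] at hm ⊢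
        simp only [hm, hs, if_true, hR]
        have hlast : ((runs' ++ [(s, (n : Int) - 1)]).getLast?) = some (s, (n : Int) - 1) := by
          simp
        rw [hlast]
        refine ⟨runs', ?_, hfilt, fun p hp => by have := hb p hp; push_cast; omega⟩
        have hc : ((n + 1 : Nat) : Int) - 1 = (n : Int) := by push_cast; ring
        rw [hc]
        simp

-- run list vs boundary lists: starts are the first components, ends the second ones
theorem runs_fst_snd (mask : List Bool) (n : Nat) :
    let R := (PySem.List.pyRange 0 (n : Int) 1).foldl (fcsStepR mask) []
    R.map Prod.fst = (PySem.List.pyRange 0 (n : Int) 1).filter (fcsStartP mask) ∧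
    (if 0 < n ∧ fcsGet mask ((n : Int) - 1) = true then
       ∃ R' s, R = R' ++ [(s, (n : Int) - 1)] ∧
         R'.map Prod.snd = (PySem.List.pyRange 0 ((n : Int) - 1) 1).filter (fcsEndCore mask)
     else R.map Prod.snd = (PySem.List.pyRange 0 (n : Int) 1).filter (fcsEndCore mask)) := by
  induction n with
  | zero => simp [PySem.List.pyRange_one_eq_nil]
  | succ n ih =>
    have hc1 : ((n + 1 : Nat) : Int) - 1 = (n : Int) := by push_cast; ring
    have hsplit : PySem.List.pyRange 0 ((n + 1 : Nat) : Int) 1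
        = PySem.List.pyRange 0 (n : Int) 1 ++ [(n : Int)] := by
      push_cast
      exact PySem.List.pyRange_one_succ_right (by positivity)
    simp only [hsplit, List.foldl_append, List.foldl_cons, List.foldl_nil, hc1]
    set R0 := (PySem.List.pyRange 0 (n : Int) 1).foldl (fcsStepR mask) [] with hR0
    obtain ⟨ihf, ihs⟩ := ih
    have hsplit2 : 0 < n → PySem.List.pyRange 0 (n : Int) 1
        = PySem.List.pyRange 0 ((n : Int) - 1) 1 ++ [(n : Int) - 1] := by
      intro hn
      nth_rewrite 1 [show (n : Int) = ((n : Int) - 1) + 1 by ring]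
      exact PySem.List.pyRange_one_succ_right (show (0:Int) ≤ (n : Int) - 1 by omega)
    cases hg : fcsGet mask (n : Int) with
    | false =>
      have hstep : fcsStepR mask R0 (n : Int) = R0 := by simp [fcsStepR, hg]
      have hsp : fcsStartP mask (n : Int) = false := by simp [fcsStartP, hg]
      rw [hstep]
      constructor
      · rw [List.filter_append, ihf]; simp [hsp]
      · rw [if_neg (by simp)]
        have hecn : fcsEndCore mask (n : Int) = false := by simp [fcsEndCore, hg]
        rw [List.filter_append]
        simp only [List.filter_cons, List.filter_nil, hecn, Bool.false_eq_true, if_false,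
          List.append_nil]
        by_cases h0 : 0 < n ∧ fcsGet mask ((n : Int) - 1) = true
        · rw [if_pos h0] at ihs
          obtain ⟨R', s, hR, hR's⟩ := ihs
          rw [hR, List.map_append]
          rw [hsplit2 h0.1, List.filter_append, ← hR's]
          have hec : fcsEndCore mask ((n : Int) - 1) = true := by
            simp [fcsEndCore, h0.2, hg]
          simp [hec]
        · rw [if_neg h0] at ihs
          exact ihs
    | true =>
      by_cases h0 : 0 < n ∧ fcsGet mask ((n : Int) - 1) = true
      · rw [if_pos h0] at ihs
        obtain ⟨R', s, hR, hR's⟩ := ihs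
        have hlast : R0.getLast? = some (s, (n : Int) - 1) := by rw [hR]; simp
        have hstep : fcsStepR mask R0 (n : Int) = R' ++ [(s, (n : Int))] := by
          simp [fcsStepR, hg, hR]
        have hsp : fcsStartP mask (n : Int) = false := by
          have hz : ((n : Int) == 0) = false := by
            simp; omega
          simp [fcsStartP, hz, h0.2]
        rw [hstep]
        constructor
        · have hfst : (R' ++ [(s, (n : Int))]).map Prod.fst = R0.map Prod.fst := by
            rw [hR]; simp
          rw [List.filter_append, hfst, ihf]; simp [hsp]
        · rw [if_pos ⟨Nat.succ_pos n, rfl⟩]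
          refine ⟨R', s, rfl, ?_⟩
          rw [hsplit2 h0.1, List.filter_append]
          have hec : fcsEndCore mask ((n : Int) - 1) = false := by
            simp [fcsEndCore, h0.2, hg]
          simp [hec, hR's]
      · rw [if_neg h0] at ihs
        have hstep : fcsStepR mask R0 (n : Int) = R0 ++ [((n : Int), (n : Int))] := by
          cases hl : R0.getLast? with
          | none => simp [fcsStepR, hg, hl]
          | some pe =>
            obtain ⟨s0, e0⟩ := pe
            have hmem : e0 ∈ R0.map Prod.snd :=
              List.mem_map_of_mem (List.mem_of_getLast? hl)
            rw [ihs] at hmem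
            have hec : fcsEndCore mask e0 = true := (List.mem_filter.mp hmem).2
            have hne : e0 ≠ (n : Int) - 1 := by
              intro he
              rw [he] at hec
              simp [fcsEndCore, hg] at hec
            simp [fcsStepR, hg, hl, hne]
        have hsp : fcsStartP mask (n : Int) = true := by
          rcases not_and_or.mp h0 with h | h
          · have hn0 : n = 0 := by omega
            subst hn0
            simpa [fcsStartP] using hg
          · have hgf : fcsGet mask ((n : Int) - 1) = false := by
              simpa using h
            simp [fcsStartP, hg, hgf]
        rw [hstep]
        constructor
        · rw [List.filter_append, List.map_append, ihf]
          simp [hsp]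
        · rw [if_pos ⟨Nat.succ_pos n, rfl⟩]
          exact ⟨R0, (n : Int), rfl, ihs⟩

-- the zip of the two boundary lists IS the run list
theorem zip_eq_runs (mask : List Bool) (n : Nat) :
    ((PySem.List.pyRange 0 (n : Int) 1).filter (fcsStartP mask)).zip
      ((PySem.List.pyRange 0 (n : Int) 1).filter (fcsEndP mask (n : Int)))
    = (PySem.List.pyRange 0 (n : Int) 1).foldl (fcsStepR mask) [] := by
  obtain ⟨hfst, hsnd⟩ := runs_fst_snd mask n
  set R := (PySem.List.pyRange 0 (n : Int) 1).foldl (fcsStepR mask) [] with hRdef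
  have hEC : ∀ i : Int, i ∈ PySem.List.pyRange 0 ((n : Int) - 1) 1 →
      fcsEndP mask (n : Int) i = fcsEndCore mask i := by
    intro i hi
    rw [PySem.List.mem_pyRange_one] at hi
    have hz : (i == (n : Int) - 1) = false := by simp; omega
    simp [fcsEndP, fcsEndCore, hz]
  have hends : (PySem.List.pyRange 0 (n : Int) 1).filter (fcsEndP mask (n : Int))
      = R.map Prod.snd := by
    by_cases h0 : 0 < n ∧ fcsGet mask ((n : Int) - 1) = true
    · rw [if_pos h0] at hsnd
      obtain ⟨R', s, hR, hR's⟩ := hsnd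
      have hsplit2 : PySem.List.pyRange 0 (n : Int) 1
          = PySem.List.pyRange 0 ((n : Int) - 1) 1 ++ [(n : Int) - 1] := by
        nth_rewrite 1 [show (n : Int) = ((n : Int) - 1) + 1 by ring]
        exact PySem.List.pyRange_one_succ_right (show (0:Int) ≤ (n : Int) - 1 by omega)
      have hepn : fcsEndP mask (n : Int) ((n : Int) - 1) = true := by
        simp [fcsEndP, h0.2]
      rw [hsplit2, List.filter_append, List.filter_congr hEC, ← hR's, hR, List.map_append]
      simp [hepn]
    · rw [if_neg h0] at hsnd
      rw [hsnd]
      apply List.filter_congr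
      intro i hi
      rw [PySem.List.mem_pyRange_one] at hi
      by_cases he : i = (n : Int) - 1
      · have hgf : fcsGet mask ((n : Int) - 1) = false := by
          rcases not_and_or.mp h0 with h | h
          · omega
          · simpa using h
        subst he
        simp [fcsEndP, fcsEndCore, hgf]
      · have hz : (i == (n : Int) - 1) = false := by simp [he]
        simp [fcsEndP, fcsEndCore, hz]
  rw [hends, ← hfst, List.zip_map']
  simp

-- A's result is the run list filtered by length
theorem A_eq_filter_runs (mask : List Bool) (min_length : Int) (n : Nat) :
    find_continuous_segments_py mask (n : Int) min_length
    = ((PySem.List.pyRange 0 (n : Int) 1).foldl (fcsStepR mask) []).filter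
        (fcsPred min_length) := by
  have ih := fcs_inv mask min_length n
  simp only at ih
  unfold find_continuous_segments_py
  set stA := (PySem.List.pyRange 0 (n : Int) 1).foldl (fcsStepA mask min_length) ([], none)
    with hA
  set R := (PySem.List.pyRange 0 (n : Int) 1).foldl (fcsStepR mask) [] with hR
  cases hs : stA.2 with
  | none =>
    rw [hs] at ih
    simp only [hs]
    exact ih.1.symm
  | some s =>
    rw [hs] at ih
    obtain ⟨runs', hRe, hfilt, _⟩ := ih
    simp only [hs, hRe]
    rw [List.filter_append, hfilt, List.filter_singleton]
    by_cases h : min_length ≤ ((n : Int) - 1) - s + 1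
    · simp [h, fcsPred]
    · simp [h, fcsPred]

-- ===== VERDICT (by name: the statement is the Claim_ definition above) =====
theorem find_continuous_segments_py_spec : Claim_equal_find_continuous_segments_py := by
  intro mask seq_len min_length _ _
  unfold Spec_find_continuous_segments_py find_continuous_segments_py_alt
  by_cases hpos : seq_len ≤ 0
  · simp [find_continuous_segments_py, PySem.List.pyRange_one_eq_nil hpos]
  · have hn : seq_len = ((seq_len.toNat : Nat) : Int) := (Int.toNat_of_nonneg (by omega)).symm
    rw [hn, A_eq_filter_runs, ← zip_eq_runs]
    rfl
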